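-- pv_equiv track=rewrite | github.com/krstoilo/SoftUni-Fundamentals | Python-Fundamentals/Homeworks-and-labs/functions/array_manipulator.py | last_odd
-- ===== SOURCE A (Python) =====
-- def last_odd(count_l_odd, array):
--     odd_array = []
--     needed_count_array = []
--     for i in range(len(array)):
--         if array[i] % 2 != 0:
--             odd_array.append(array[i])
--     if count_l_odd > len(odd_array):
--         count_l_odd = len(odd_array)
--     for n in range((len(odd_array) - count_l_odd), len(odd_array)):
--         needed_count_array.append(odd_array[n])
--     return needed_count_array
-- ===== SOURCE B (Python) =====
-- def last_odd(count_l_odd, array):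
--     k = count_l_odd if count_l_odd > 0 else 0
--     acc = []
--     for x in reversed(array):
--         if len(acc) >= k:
--             break
--         if x % 2 != 0:
--             acc.append(x)
--     acc.reverse()
--     return acc
-- ===== Notes on version B (the rewrite author's own statement) =====
-- stated objective: alternative
-- what changed: Replaces 'filter all odds into a list, then re-index its tail with a second range loop' by a single backwards scan that collects at most count_l_odd odd elements and stops early, then reverses the collected suffix.
import Mathlib
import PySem

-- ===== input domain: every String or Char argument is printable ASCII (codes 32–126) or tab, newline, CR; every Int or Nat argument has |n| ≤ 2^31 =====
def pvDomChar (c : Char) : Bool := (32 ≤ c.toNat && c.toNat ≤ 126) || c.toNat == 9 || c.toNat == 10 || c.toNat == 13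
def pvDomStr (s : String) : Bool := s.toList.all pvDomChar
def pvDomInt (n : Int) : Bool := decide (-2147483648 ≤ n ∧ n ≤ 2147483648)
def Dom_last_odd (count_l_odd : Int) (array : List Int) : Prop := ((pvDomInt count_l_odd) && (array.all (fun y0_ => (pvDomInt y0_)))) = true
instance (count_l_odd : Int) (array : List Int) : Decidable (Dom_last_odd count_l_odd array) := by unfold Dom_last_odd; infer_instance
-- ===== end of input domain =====

-- B replaces A's "filter all odds into a new list, then re-index its tail with a second range loop"
-- by a single backwards scan collecting at most count_l_odd odd elements with early stop, then a reverse.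


-- ===== PORT A =====
def last_odd (count_l_odd : Int) (array : List Int) : List Int :=
  -- odd_array = []; for i in range(len(array)): if array[i] % 2 != 0: odd_array.append(array[i])
  -- (indices are always in range here, so xs[i] is ported as pyGetD with an unused default)
  let odd_array := (PySem.List.pyRange 0 (array.length : Int) 1).foldl
      (fun acc i => if PySem.Int.mod (PySem.List.pyGetD array i 0) 2 ≠ 0
                    then acc ++ [PySem.List.pyGetD array i 0] else acc) []
  -- if count_l_odd > len(odd_array): count_l_odd = len(odd_array)
  let c := if count_l_odd > (odd_array.length : Int) then (odd_array.length : Int) else count_l_odd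
  -- for n in range(len(odd_array) - count_l_odd, len(odd_array)): needed_count_array.append(odd_array[n])
  (PySem.List.pyRange ((odd_array.length : Int) - c) (odd_array.length : Int) 1).foldl
      (fun acc n => acc ++ [PySem.List.pyGetD odd_array n 0]) []

-- ===== PORT B =====
-- for x in reversed(array): if len(acc) >= k: break; if x % 2 != 0: acc.append(x)
def last_odd_go (k : Int) : List Int → List Int → List Int
  | [], acc => acc
  | x :: xs, acc =>
      if (acc.length : Int) ≥ k then acc
      else if PySem.Int.mod x 2 ≠ 0 then last_odd_go k xs (acc ++ [x])
      else last_odd_go k xs acc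

def last_odd_alt (count_l_odd : Int) (array : List Int) : List Int :=
  let k := if count_l_odd > 0 then count_l_odd else 0
  (last_odd_go k array.reverse []).reverse

-- ===== PRECONDITION & SPEC =====
def Spec_last_odd (count_l_odd : Int) (array : List Int) (out : List Int) : Prop := out = last_odd_alt count_l_odd array
instance (count_l_odd : Int) (array : List Int) (out : List Int) : Decidable (Spec_last_odd count_l_odd array out) := by unfold Spec_last_odd; infer_instance

-- ===== CLAIM (what is proved, stated in full; the proofs are below) =====
def Claim_equal_last_odd : Prop := ∀ (count_l_odd : Int) (array : List Int), Dom_last_odd count_l_odd array → Spec_last_odd count_l_odd array (last_odd count_l_odd array)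

-- ===== LEMMAS AND PROOFS =====

-- the odd test both programs apply
def pvOdd (x : Int) : Bool := decide (PySem.Int.mod x 2 ≠ 0)

-- B's scan appends (a prefix of) the odds of its input, bounded by the remaining budget
theorem last_odd_go_spec (k : Int) (xs : List Int) : ∀ acc : List Int, (acc.length : Int) ≤ k →
    last_odd_go k xs acc = acc ++ (xs.filter pvOdd).take (k.toNat - acc.length) := by
  induction xs with
  | nil => intro acc _; simp [last_odd_go]
  | cons x xs ih =>
    intro acc h
    by_cases hk : (acc.length : Int) ≥ k
    · have h0 : k.toNat - acc.length = 0 := by omega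
      rw [show last_odd_go k (x :: xs) acc = acc by simp only [last_odd_go]; rw [if_pos hk]]
      rw [h0, List.take_zero, List.append_nil]
    · by_cases hx : PySem.Int.mod x 2 ≠ 0
      · rw [show last_odd_go k (x :: xs) acc = last_odd_go k xs (acc ++ [x]) by
          simp only [last_odd_go]; rw [if_neg hk, if_pos hx]]
        rw [ih (acc ++ [x]) (by simp only [List.length_append, List.length_cons, List.length_nil]; omega)]
        have hfx : pvOdd x = true := by unfold pvOdd; exact decide_eq_true hx
        rw [List.filter_cons_of_pos hfx]
        rw [show k.toNat - acc.length = (k.toNat - (acc ++ [x]).length) + 1 by simp only [List.length_append, List.length_cons, List.length_nil]; omega]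
        rw [List.take_succ_cons]
        simp only [List.append_assoc, List.cons_append, List.nil_append]
      · rw [show last_odd_go k (x :: xs) acc = last_odd_go k xs acc by
          simp only [last_odd_go]; rw [if_neg hk, if_neg hx]]
        rw [ih acc h]
        have hfx : pvOdd x = false := by unfold pvOdd; exact decide_eq_false hx
        rw [List.filter_cons_of_neg (by simp [hfx])]

-- B in closed form: the last min(max(count,0), #odds) odds, i.e. a drop of the odds list
theorem last_odd_alt_eq (count_l_odd : Int) (array : List Int) :
    last_odd_alt count_l_odd array =
      (array.filter pvOdd).drop ((array.filter pvOdd).length - count_l_odd.toNat) := by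
  have hk : (if count_l_odd > 0 then count_l_odd else 0).toNat = count_l_odd.toNat := by
    split <;> omega
  show (last_odd_go (if count_l_odd > 0 then count_l_odd else 0) array.reverse []).reverse = _
  rw [last_odd_go_spec _ _ []
    (by simp only [List.length_nil, Nat.cast_zero]; split <;> omega)]
  simp only [List.nil_append, List.length_nil, Nat.sub_zero, hk]
  rw [List.filter_reverse, List.take_reverse, List.reverse_reverse]

-- A's second loop: appending odd_array[n] for n in [len-c, len) is a drop (for c ≤ len)
theorem last_odd_tail_loop (l : List Int) (c : Int) (hc : c ≤ (l.length : Int)) :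
    (PySem.List.pyRange ((l.length : Int) - c) (l.length : Int) 1).foldl
      (fun acc n => acc ++ [PySem.List.pyGetD l n 0]) [] = l.drop (l.length - c.toNat) := by
  by_cases h0 : 0 < c
  · rw [PySem.List.foldl_pyRange_pyGetD' l 0 (fun acc v => acc ++ [v]) [] (by omega)]
    rw [PySem.List.foldl_append_singleton_eq_self]
    simp only [List.nil_append]
    congr 1
    omega
  · rw [PySem.List.pyRange_one_eq_nil (by omega)]
    rw [show l.length - c.toNat = l.length by omega]
    simp [List.drop_length]

-- A in the same closed form
theorem last_odd_eq (count_l_odd : Int) (array : List Int) :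
    last_odd count_l_odd array =
      (array.filter pvOdd).drop ((array.filter pvOdd).length - count_l_odd.toNat) := by
  have hfold : (PySem.List.pyRange 0 (array.length : Int) 1).foldl
      (fun acc i => if PySem.Int.mod (PySem.List.pyGetD array i 0) 2 ≠ 0
                    then acc ++ [PySem.List.pyGetD array i 0] else acc) [] = array.filter pvOdd := by
    rw [PySem.List.foldl_pyRange_zero_pyGetD' array 0
        (fun acc v => if PySem.Int.mod v 2 ≠ 0 then acc ++ [v] else acc) []]
    rw [PySem.List.foldl_append_ite_eq_filter]
    simp only [List.nil_append]
    rfl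
  simp only [last_odd, hfold]
  by_cases hc : count_l_odd > ((array.filter pvOdd).length : Int)
  · rw [if_pos hc]
    rw [last_odd_tail_loop _ _ (by omega)]
    congr 1
    omega
  · rw [if_neg hc]
    rw [last_odd_tail_loop _ _ (by omega)]

-- ===== VERDICT (by name: the statement is the Claim_ definition above) =====
theorem last_odd_spec : Claim_equal_last_odd := by
  intro c a _
  unfold Spec_last_odd
  rw [last_odd_eq, last_odd_alt_eq]
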